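-- pv_equiv track=rewrite | github.com/dochobbs/provton | providertone-local/src/generators/messaging_profile.py | generate_tone_description
-- ===== SOURCE A (Python) =====
-- from typing import Dict, Any, List
--
-- def generate_tone_description(tone: str, score: int, analysis: Dict) -> str:
--     """Generate natural language description of tone dimension."""
--     descriptions = {
--         'warmth': {
--             (1, 3): "Clinical and reserved, focuses on facts over feelings",
--             (4, 6): "Balanced warmth, professional but personable",
--             (7, 10): "Highly warm and empathetic, prioritizes emotional connection"
--         },
--         'certainty': {
--             (1, 3): "Frequently hedges, emphasizes uncertainty",
--             (4, 6): "Appropriately confident with clear limitations",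
--             (7, 10): "Projects strong confidence, direct statements"
--         },
--         'directiveness': {
--             (1, 3): "Collaborative, offers options and suggestions",
--             (4, 6): "Balanced guidance with patient autonomy",
--             (7, 10): "Clearly directive, tells patients what to do"
--         },
--         'formality': {
--             (1, 3): "Casual and conversational",
--             (4, 6): "Professional but approachable",
--             (7, 10): "Formal and clinical"
--         },
--         'thoroughness': {
--             (1, 3): "Brief and to the point",
--             (4, 6): "Adequate detail for context",
--             (7, 10): "Comprehensive, addresses multiple angles"
--         }
--     }
--
--     for (low, high), desc in descriptions.get(tone, {}).items():
--         if low <= score <= high: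
--             return desc
--
--     return f"Moderate {tone}"
-- ===== SOURCE B (Python) =====
-- _BANDS = {
--     'warmth': ["Clinical and reserved, focuses on facts over feelings",
--                "Balanced warmth, professional but personable",
--                "Highly warm and empathetic, prioritizes emotional connection"],
--     'certainty': ["Frequently hedges, emphasizes uncertainty",
--                   "Appropriately confident with clear limitations",
--                   "Projects strong confidence, direct statements"],
--     'directiveness': ["Collaborative, offers options and suggestions",
--                       "Balanced guidance with patient autonomy",
--                       "Clearly directive, tells patients what to do"],
--     'formality': ["Casual and conversational",
--                   "Professional but approachable",
--                   "Formal and clinical"],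
--     'thoroughness': ["Brief and to the point",
--                      "Adequate detail for context",
--                      "Comprehensive, addresses multiple angles"],
-- }
--
-- # Precomputed once: every (tone, score) pair with an integer score 1..10 maps
-- # directly to its description; everything else falls through to the default.
-- _FLAT = {(tone, s): descs[(s >= 4) + (s >= 7)]
--          for tone, descs in _BANDS.items()
--          for s in range(1, 11)}
--
-- def generate_tone_description(tone: str, score: int, analysis) -> str:
--     """Generate natural language description of tone dimension."""
--     return _FLAT.get((tone, score), f"Moderate {tone}")
-- ===== Notes on version B (the rewrite author's own statement) =====
-- stated objective: alternative
-- what changed: Replaces the per-call nested dict of (low,high) range keys and the linear range-comparison scan with a module-level flat dict precomputed over all integer scores 1..10, so a call is a single exact-key lookup with no range comparisons.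
import Mathlib
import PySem

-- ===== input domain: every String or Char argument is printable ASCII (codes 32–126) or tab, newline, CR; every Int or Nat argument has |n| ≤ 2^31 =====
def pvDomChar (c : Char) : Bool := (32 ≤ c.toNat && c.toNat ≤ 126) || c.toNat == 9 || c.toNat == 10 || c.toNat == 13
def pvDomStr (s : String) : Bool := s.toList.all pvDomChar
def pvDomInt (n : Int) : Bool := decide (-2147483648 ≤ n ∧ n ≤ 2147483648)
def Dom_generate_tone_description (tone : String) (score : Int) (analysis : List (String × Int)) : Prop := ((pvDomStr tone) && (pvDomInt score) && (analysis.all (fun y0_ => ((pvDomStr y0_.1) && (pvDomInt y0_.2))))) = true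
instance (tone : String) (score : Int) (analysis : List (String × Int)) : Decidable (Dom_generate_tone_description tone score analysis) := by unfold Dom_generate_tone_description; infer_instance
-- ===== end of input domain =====

-- B replaces A's per-call nested dict of (low,high) range keys and its range-comparison
-- scan with a flat dict precomputed over all integer scores 1..10 and a single exact-key
-- lookup (objective: alternative).


-- ===== PORT A =====
-- descriptions.get(tone, {}) : the per-tone dict as an association list in insertion order
def pvDescriptionsGet (tone : String) : List ((Int × Int) × String) :=
  if tone = "warmth" then
    [((1, 3), "Clinical and reserved, focuses on facts over feelings"),
     ((4, 6), "Balanced warmth, professional but personable"),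
     ((7, 10), "Highly warm and empathetic, prioritizes emotional connection")]
  else if tone = "certainty" then
    [((1, 3), "Frequently hedges, emphasizes uncertainty"),
     ((4, 6), "Appropriately confident with clear limitations"),
     ((7, 10), "Projects strong confidence, direct statements")]
  else if tone = "directiveness" then
    [((1, 3), "Collaborative, offers options and suggestions"),
     ((4, 6), "Balanced guidance with patient autonomy"),
     ((7, 10), "Clearly directive, tells patients what to do")]
  else if tone = "formality" then
    [((1, 3), "Casual and conversational"),
     ((4, 6), "Professional but approachable"),
     ((7, 10), "Formal and clinical")]
  else if tone = "thoroughness" then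
    [((1, 3), "Brief and to the point"),
     ((4, 6), "Adequate detail for context"),
     ((7, 10), "Comprehensive, addresses multiple angles")]
  else []

-- the for-loop: first ((low,high),desc) item with low <= score <= high
def pvDescLoop (score : Int) : List ((Int × Int) × String) → Option String
  | [] => none
  | ((low, high), desc) :: rest =>
      if low ≤ score ∧ score ≤ high then some desc else pvDescLoop score rest

def generate_tone_description (tone : String) (score : Int) (analysis : List (String × Int)) : String :=
  match pvDescLoop score (pvDescriptionsGet tone) with
  | some desc => desc
  | none => "Moderate " ++ tone

-- ===== PORT B =====
-- _BANDS : per-tone list of the three band descriptions, insertion order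
def pvBands : List (String × List String) :=
  [("warmth", ["Clinical and reserved, focuses on facts over feelings",
               "Balanced warmth, professional but personable",
               "Highly warm and empathetic, prioritizes emotional connection"]),
   ("certainty", ["Frequently hedges, emphasizes uncertainty",
                  "Appropriately confident with clear limitations",
                  "Projects strong confidence, direct statements"]),
   ("directiveness", ["Collaborative, offers options and suggestions",
                      "Balanced guidance with patient autonomy",
                      "Clearly directive, tells patients what to do"]),
   ("formality", ["Casual and conversational",
                  "Professional but approachable",
                  "Formal and clinical"]),
   ("thoroughness", ["Brief and to the point",
                     "Adequate detail for context",
                     "Comprehensive, addresses multiple angles"])]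

-- descs[(s >= 4) + (s >= 7)] : the index is always 0, 1 or 2, so in range for the 3-element lists
def pvPick (descs : List String) (s : Int) : String :=
  PySem.List.pyGetD descs ((if 4 ≤ s then (1 : Int) else 0) + (if 7 ≤ s then 1 else 0)) ""

-- _FLAT : the dict comprehension over _BANDS.items() and range(1, 11)
def pvFlat : PySem.Dict (String × Int) String :=
  PySem.Dict.ofList
    (pvBands.flatMap (fun td =>
      (PySem.List.pyRange 1 11 1).map (fun s => ((td.1, s), pvPick td.2 s))))

def generate_tone_description_alt (tone : String) (score : Int) (analysis : List (String × Int)) : String :=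
  pvFlat.getD (tone, score) ("Moderate " ++ tone)

-- ===== PRECONDITION & SPEC =====
def Spec_generate_tone_description (tone : String) (score : Int) (analysis : List (String × Int)) (out : String) : Prop := out = generate_tone_description_alt tone score analysis
instance (tone : String) (score : Int) (analysis : List (String × Int)) (out : String) : Decidable (Spec_generate_tone_description tone score analysis out) := by unfold Spec_generate_tone_description; infer_instance

-- ===== CLAIM (what is proved, stated in full; the proofs are below) =====
def Claim_equal_generate_tone_description : Prop := ∀ (tone : String) (score : Int) (analysis : List (String × Int)), Dom_generate_tone_description tone score analysis → Spec_generate_tone_description tone score analysis (generate_tone_description tone score analysis)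

-- ===== LEMMAS AND PROOFS =====
-- pvFlat written out as the literal 50-entry dict it evaluates to
def pvFlatList : List ((String × Int) × String) := [
    (("warmth", 1), "Clinical and reserved, focuses on facts over feelings"),
    (("warmth", 2), "Clinical and reserved, focuses on facts over feelings"),
    (("warmth", 3), "Clinical and reserved, focuses on facts over feelings"),
    (("warmth", 4), "Balanced warmth, professional but personable"),
    (("warmth", 5), "Balanced warmth, professional but personable"),
    (("warmth", 6), "Balanced warmth, professional but personable"),
    (("warmth", 7), "Highly warm and empathetic, prioritizes emotional connection"),
    (("warmth", 8), "Highly warm and empathetic, prioritizes emotional connection"),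
    (("warmth", 9), "Highly warm and empathetic, prioritizes emotional connection"),
    (("warmth", 10), "Highly warm and empathetic, prioritizes emotional connection"),
    (("certainty", 1), "Frequently hedges, emphasizes uncertainty"),
    (("certainty", 2), "Frequently hedges, emphasizes uncertainty"),
    (("certainty", 3), "Frequently hedges, emphasizes uncertainty"),
    (("certainty", 4), "Appropriately confident with clear limitations"),
    (("certainty", 5), "Appropriately confident with clear limitations"),
    (("certainty", 6), "Appropriately confident with clear limitations"),
    (("certainty", 7), "Projects strong confidence, direct statements"),
    (("certainty", 8), "Projects strong confidence, direct statements"),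
    (("certainty", 9), "Projects strong confidence, direct statements"),
    (("certainty", 10), "Projects strong confidence, direct statements"),
    (("directiveness", 1), "Collaborative, offers options and suggestions"),
    (("directiveness", 2), "Collaborative, offers options and suggestions"),
    (("directiveness", 3), "Collaborative, offers options and suggestions"),
    (("directiveness", 4), "Balanced guidance with patient autonomy"),
    (("directiveness", 5), "Balanced guidance with patient autonomy"),
    (("directiveness", 6), "Balanced guidance with patient autonomy"),
    (("directiveness", 7), "Clearly directive, tells patients what to do"),
    (("directiveness", 8), "Clearly directive, tells patients what to do"),
    (("directiveness", 9), "Clearly directive, tells patients what to do"),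
    (("directiveness", 10), "Clearly directive, tells patients what to do"),
    (("formality", 1), "Casual and conversational"),
    (("formality", 2), "Casual and conversational"),
    (("formality", 3), "Casual and conversational"),
    (("formality", 4), "Professional but approachable"),
    (("formality", 5), "Professional but approachable"),
    (("formality", 6), "Professional but approachable"),
    (("formality", 7), "Formal and clinical"),
    (("formality", 8), "Formal and clinical"),
    (("formality", 9), "Formal and clinical"),
    (("formality", 10), "Formal and clinical"),
    (("thoroughness", 1), "Brief and to the point"),
    (("thoroughness", 2), "Brief and to the point"),
    (("thoroughness", 3), "Brief and to the point"),
    (("thoroughness", 4), "Adequate detail for context"),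
    (("thoroughness", 5), "Adequate detail for context"),
    (("thoroughness", 6), "Adequate detail for context"),
    (("thoroughness", 7), "Comprehensive, addresses multiple angles"),
    (("thoroughness", 8), "Comprehensive, addresses multiple angles"),
    (("thoroughness", 9), "Comprehensive, addresses multiple angles"),
    (("thoroughness", 10), "Comprehensive, addresses multiple angles")]

def pvFlatLit : PySem.Dict (String × Int) String := PySem.Dict.mk pvFlatList

set_option maxRecDepth 20000 in
theorem pvFlat_eq_lit : pvFlat = pvFlatLit := by decide

-- get? on a literal dict none of whose keys equals the query is none
theorem pv_get?_none (l : List ((String × Int) × String)) (k : String × Int)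
    (h : ∀ p ∈ l, p.1 ≠ k) : (PySem.Dict.mk l).get? k = none := by
  induction l with
  | nil => rfl
  | cons a t ih =>
      obtain ⟨k', v⟩ := a
      rw [PySem.Dict.get?_mk_cons]
      rw [if_neg (by simpa using h (k', v) (List.mem_cons_self ..))]
      exact ih (fun p hp => h p (List.mem_cons_of_mem _ hp))

theorem pv_fallback (tone : String) (score : Int)
    (h : ∀ p ∈ pvFlatList, p.1 ≠ (tone, score)) :
    pvFlatLit.getD (tone, score) ("Moderate " ++ tone) = "Moderate " ++ tone := by
  rw [PySem.Dict.getD_eq_get?_getD]; unfold pvFlatLit; rw [pv_get?_none _ _ h]; rfl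

-- every key's score component lies in 1..10
set_option maxRecDepth 20000 in
theorem pv_keys : ∀ p ∈ pvFlatList, 1 ≤ p.1.2 ∧ p.1.2 ≤ 10 := by
  have h : pvFlatList.all (fun p => decide (1 ≤ p.1.2 ∧ p.1.2 ≤ 10)) = true := by decide
  intro p hp; exact of_decide_eq_true (List.all_eq_true.mp h p hp)

-- every key's tone component is one of the five known tones
set_option maxRecDepth 20000 in
theorem pv_tones : ∀ p ∈ pvFlatList,
    p.1.1 = "warmth" ∨ p.1.1 = "certainty" ∨ p.1.1 = "directiveness" ∨
    p.1.1 = "formality" ∨ p.1.1 = "thoroughness" := by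
  have h : pvFlatList.all (fun p => decide (p.1.1 = "warmth" ∨ p.1.1 = "certainty" ∨
      p.1.1 = "directiveness" ∨ p.1.1 = "formality" ∨ p.1.1 = "thoroughness")) = true := by decide
  intro p hp; exact of_decide_eq_true (List.all_eq_true.mp h p hp)

-- out-of-range score: B falls back
theorem pv_oob (tone : String) (score : Int) (hs : ¬(1 ≤ score ∧ score ≤ 10)) :
    pvFlatLit.getD (tone, score) ("Moderate " ++ tone) = "Moderate " ++ tone := by
  apply pv_fallback
  intro p hp he
  have hk := pv_keys p hp
  rw [he] at hk
  exact hs hk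

-- unknown tone: B falls back
theorem pv_unknown (tone : String) (score : Int)
    (h1 : ¬tone = "warmth") (h2 : ¬tone = "certainty") (h3 : ¬tone = "directiveness")
    (h4 : ¬tone = "formality") (h5 : ¬tone = "thoroughness") :
    pvFlatLit.getD (tone, score) ("Moderate " ++ tone) = "Moderate " ++ tone := by
  apply pv_fallback
  intro p hp he
  have ht := pv_tones p hp
  rw [he] at ht
  simp only at ht
  rcases ht with h | h | h | h | h
  exacts [h1 h, h2 h, h3 h, h4 h, h5 h]

-- A's scan agrees with B's flat lookup for every tone and score
set_option maxRecDepth 20000 in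
set_option maxHeartbeats 2000000 in
theorem pv_main (tone : String) (score : Int) :
    generate_tone_description tone score [] = generate_tone_description_alt tone score [] := by
  unfold generate_tone_description generate_tone_description_alt
  rw [pvFlat_eq_lit]
  by_cases hs : 1 ≤ score ∧ score ≤ 10
  · -- in-range score: if the tone is known both sides give the band description,
    -- otherwise both fall back
    by_cases h1 : tone = "warmth"
    · subst h1; obtain ⟨hl, hh⟩ := hs; interval_cases score <;> decide
    by_cases h2 : tone = "certainty"
    · subst h2; obtain ⟨hl, hh⟩ := hs; interval_cases score <;> decide
    by_cases h3 : tone = "directiveness"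
    · subst h3; obtain ⟨hl, hh⟩ := hs; interval_cases score <;> decide
    by_cases h4 : tone = "formality"
    · subst h4; obtain ⟨hl, hh⟩ := hs; interval_cases score <;> decide
    by_cases h5 : tone = "thoroughness"
    · subst h5; obtain ⟨hl, hh⟩ := hs; interval_cases score <;> decide
    rw [pv_unknown tone score h1 h2 h3 h4 h5]
    simp [pvDescriptionsGet, h1, h2, h3, h4, h5, pvDescLoop]
  · -- out-of-range score: both sides fall back regardless of the tone
    rw [pv_oob tone score hs]
    by_cases h1 : tone = "warmth" <;> by_cases h2 : tone = "certainty" <;>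
      by_cases h3 : tone = "directiveness" <;> by_cases h4 : tone = "formality" <;>
      by_cases h5 : tone = "thoroughness" <;>
      simp_all [pvDescriptionsGet, pvDescLoop] <;> split_ifs <;> first | omega | rfl

-- ===== VERDICT (by name: the statement is the Claim_ definition above) =====
theorem generate_tone_description_spec : Claim_equal_generate_tone_description := by
  intro tone score analysis _
  unfold Spec_generate_tone_description
  have h := pv_main tone score
  simpa [generate_tone_description, generate_tone_description_alt] using h
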